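-- pv_equiv track=rewrite | github.com/aleksashka/aoc | 2015/03/solution.py | deliver_presents
-- ===== SOURCE A (Python) =====
-- def deliver_presents(instructions):
--     current_house = [0, 0]
--     houses = {}
--     houses.setdefault(tuple(current_house), 1)
--     for instruction in instructions:
--         if instruction == '^':  # North: x, y+1
--             current_house[1] += 1
--             houses[tuple(current_house)] = houses.get(tuple(current_house), 0) + 1
--         elif instruction == 'v':  # South: x, y-1
--             current_house[1] -= 1
--             houses[tuple(current_house)] = houses.get(tuple(current_house), 0) + 1
--         elif instruction == '<':  # West: x-1, y
--             current_house[0] -= 1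
--             houses[tuple(current_house)] = houses.get(tuple(current_house), 0) + 1
--         elif instruction == '>':  # East: x+1, y
--             current_house[0] += 1
--             houses[tuple(current_house)] = houses.get(tuple(current_house), 0) + 1
--         else:
--             raise
--     return(len(houses))
-- ===== SOURCE B (Python) =====
-- def deliver_presents(instructions):
--     deltas = {'^': (0, 1), 'v': (0, -1), '<': (-1, 0), '>': (1, 0)}
--     moves = [deltas[c] for c in instructions]
--     trail = [(0, 0)]
--     for dx, dy in moves:
--         x, y = trail[-1]
--         trail.append((x + dx, y + dy))
--     trail.sort()
--     distinct = 1
--     for prev, cur in zip(trail, trail[1:]):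
--         if prev != cur:
--             distinct += 1
--     return distinct
-- ===== Notes on version B (the rewrite author's own statement) =====
-- stated objective: alternative
-- what changed: Replaces A's single pass with a visit-count dict by a staged pipeline: map each instruction to a delta, build the trail of visited positions by prefix sums, then count distinct houses by sorting the trail and counting boundaries between unequal adjacent pairs (sort-then-scan instead of hashing).
import Mathlib
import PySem

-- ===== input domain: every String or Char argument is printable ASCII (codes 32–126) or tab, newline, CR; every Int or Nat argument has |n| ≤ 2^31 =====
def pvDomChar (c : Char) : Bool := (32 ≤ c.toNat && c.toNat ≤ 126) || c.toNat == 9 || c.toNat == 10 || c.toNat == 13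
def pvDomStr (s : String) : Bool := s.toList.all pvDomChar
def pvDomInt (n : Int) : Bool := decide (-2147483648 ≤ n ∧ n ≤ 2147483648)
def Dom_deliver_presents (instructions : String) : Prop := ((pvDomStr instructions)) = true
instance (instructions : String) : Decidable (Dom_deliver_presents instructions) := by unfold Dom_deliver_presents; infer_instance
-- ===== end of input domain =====

-- B replaces A's single-pass visit-count dict with a staged pipeline: map instructions to
-- deltas, build the trail of positions by prefix sums, sort it, and count distinct houses
-- by scanning for unequal adjacent pairs (sort-then-scan instead of hashing; alternative algorithm, same task).


-- ===== PORT A =====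
-- one step of A's loop; `none` models the bare `raise` on an invalid character
def pvStepA (st : Option ((Int × Int) × PySem.Dict (Int × Int) Int)) (c : Char) :
    Option ((Int × Int) × PySem.Dict (Int × Int) Int) :=
  match st with
  | none => none
  | some (cur, houses) =>
    if c = '^' then
      let cur2 := (cur.1, cur.2 + 1)
      some (cur2, houses.insert cur2 (houses.getD cur2 0 + 1))
    else if c = 'v' then
      let cur2 := (cur.1, cur.2 - 1)
      some (cur2, houses.insert cur2 (houses.getD cur2 0 + 1))
    else if c = '<' then
      let cur2 := (cur.1 - 1, cur.2)
      some (cur2, houses.insert cur2 (houses.getD cur2 0 + 1))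
    else if c = '>' then
      let cur2 := (cur.1 + 1, cur.2)
      some (cur2, houses.insert cur2 (houses.getD cur2 0 + 1))
    else none

def deliver_presents (instructions : String) : Int :=
  match instructions.toList.foldl pvStepA
      (some ((0, 0), (PySem.Dict.empty : PySem.Dict (Int × Int) Int).setdefault (0, 0) 1)) with
  | some (_, houses) => (houses.size : Int)
  | none => 0  -- A raised: excluded by Pre_

-- ===== PORT B =====
def pvDeltas : PySem.Dict Char (Int × Int) :=
  PySem.Dict.ofList [('^', (0, 1)), ('v', (0, -1)), ('<', (-1, 0)), ('>', (1, 0))]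

def deliver_presents_alt (instructions : String) : Int :=
  -- moves = [deltas[c] for c in instructions]; `none` models the KeyError on an invalid char
  match instructions.toList.mapM (fun c => pvDeltas.get? c) with
  | none => 0  -- B raised: excluded by Pre_
  | some moves =>
    let trail := moves.foldl
      (fun tr d =>
        let p := PySem.List.pyGetD tr (-1) ((0, 0) : Int × Int)  -- trail[-1]; trail is never empty
        tr ++ [(p.1 + d.1, p.2 + d.2)])
      [((0 : Int), (0 : Int))]
    -- trail.sort(): Python sorts pairs lexicographically = the Lex order on Int × Int
    let st := PySem.List.sorted trail (fun p => toLex p) false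
    (st.zip (PySem.List.slice st (some 1) none)).foldl
      (fun acc pr => if pr.1 ≠ pr.2 then acc + 1 else acc) (1 : Int)

-- ===== PRECONDITION & SPEC =====
-- Pre_ excludes exactly the inputs containing a character other than '^','v','<','>',
-- on which A raises (bare raise → RuntimeError); B raises KeyError there.
def Pre_deliver_presents (instructions : String) : Prop :=
  (instructions.toList.all fun c => c == '^' || c == 'v' || c == '<' || c == '>') = true
instance (instructions : String) : Decidable (Pre_deliver_presents instructions) := by
  unfold Pre_deliver_presents; infer_instance

def pvWitness_deliver_presents : String := "^>v<>"

def Spec_deliver_presents (instructions : String) (out : Int) : Prop := out = deliver_presents_alt instructions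
instance (instructions : String) (out : Int) : Decidable (Spec_deliver_presents instructions out) := by unfold Spec_deliver_presents; infer_instance

-- ===== CLAIM (what is proved, stated in full; the proofs are below) =====
def Claim_equal_deliver_presents : Prop := ∀ (instructions : String), Dom_deliver_presents instructions → Pre_deliver_presents instructions → Spec_deliver_presents instructions (deliver_presents instructions)

-- ===== LEMMAS AND PROOFS =====

-- proof-side: the delta of a valid instruction, the next position, the trail of positions
def pvDelta (c : Char) : Int × Int :=
  if c = '^' then (0, 1) else if c = 'v' then (0, -1) else if c = '<' then (-1, 0) else (1, 0)

def pvNext (p d : Int × Int) : Int × Int := (p.1 + d.1, p.2 + d.2)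

def pvTrail (p : Int × Int) : List (Int × Int) → List (Int × Int)
  | [] => [p]
  | d :: ds => p :: pvTrail (pvNext p d) ds

theorem pvTrail_ne_nil (p : Int × Int) (ds : List (Int × Int)) : pvTrail p ds ≠ [] := by
  cases ds <;> simp [pvTrail]

-- the delta-table comprehension succeeds on valid instructions and yields map pvDelta
theorem pv_mapM_deltas (cs : List Char)
    (hv : ∀ c ∈ cs, c = '^' ∨ c = 'v' ∨ c = '<' ∨ c = '>') :
    cs.mapM (fun c => pvDeltas.get? c) = some (cs.map pvDelta) := by
  induction cs with
  | nil => rfl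
  | cons c cs ih =>
    have hc := hv c (List.mem_cons_self ..)
    have ih' := ih fun x hx => hv x (List.mem_cons_of_mem _ hx)
    rw [List.mapM_cons, ih']
    rcases hc with h | h | h | h <;> subst h <;> rfl

-- B's trail-building loop computes pvTrail
theorem pv_trail_fold (ds : List (Int × Int)) :
    ∀ (acc : List (Int × Int)) (p : Int × Int),
    ds.foldl
      (fun tr d =>
        let q := PySem.List.pyGetD tr (-1) ((0, 0) : Int × Int)
        tr ++ [(q.1 + d.1, q.2 + d.2)]) (acc ++ [p]) = acc ++ pvTrail p ds := by
  induction ds with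
  | nil => intro acc p; simp [pvTrail]
  | cons d ds ih =>
    intro acc p
    rw [List.foldl_cons]
    simp only [PySem.List.pyGetD_neg_one_append_singleton]
    have h2 : (acc ++ [p]) ++ [(p.1 + d.1, p.2 + d.2)] = (acc ++ [p]) ++ [pvNext p d] := rfl
    rw [h2, ih (acc ++ [p]) (pvNext p d)]
    simp [pvTrail]

-- one step of A's loop on a valid character, expressed through pvNext/pvDelta
theorem pv_step_A (c : Char) (hc : c = '^' ∨ c = 'v' ∨ c = '<' ∨ c = '>')
    (cur : Int × Int) (houses : PySem.Dict (Int × Int) Int) :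
    pvStepA (some (cur, houses)) c =
      some (pvNext cur (pvDelta c),
            houses.insert (pvNext cur (pvDelta c))
              (houses.getD (pvNext cur (pvDelta c)) 0 + 1)) := by
  rcases hc with h | h | h | h <;> subst h <;>
    simp [pvStepA, pvDelta, pvNext, sub_eq_add_neg]

-- A's loop invariant: on valid instructions the loop succeeds, the dict's keys stay
-- nodup, and membership is exactly "seen before (tr) or on the trail from cur"
theorem pv_loop_A (cs : List Char)
    (hv : ∀ c ∈ cs, c = '^' ∨ c = 'v' ∨ c = '<' ∨ c = '>') :
    ∀ (cur : Int × Int) (houses : PySem.Dict (Int × Int) Int) (tr : List (Int × Int)),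
    houses.keys.Nodup → (∀ p, p ∈ houses.keys ↔ (p ∈ tr ∨ p = cur)) →
    ∃ r, cs.foldl pvStepA (some (cur, houses)) = some r ∧
      r.2.keys.Nodup ∧ (∀ p, p ∈ r.2.keys ↔ (p ∈ tr ∨ p ∈ pvTrail cur (cs.map pvDelta))) := by
  induction cs with
  | nil =>
    intro cur houses tr hnd hmem
    exact ⟨(cur, houses), rfl, hnd, fun p => by simp [pvTrail, hmem p]⟩
  | cons c cs ih =>
    intro cur houses tr hnd hmem
    have hv' : ∀ x ∈ cs, x = '^' ∨ x = 'v' ∨ x = '<' ∨ x = '>' :=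
      fun x hx => hv x (List.mem_cons_of_mem _ hx)
    rw [List.foldl_cons, pv_step_A c (hv c (List.mem_cons_self ..))]
    obtain ⟨r, hr, hnd', hmem'⟩ := ih hv' (pvNext cur (pvDelta c)) _ (tr ++ [cur])
      (PySem.Dict.nodup_keys_insert _ _ _ hnd)
      (fun p => by
        simp only [PySem.Dict.mem_keys_insert, hmem p, List.mem_append, List.mem_singleton]
        tauto)
    refine ⟨r, hr, hnd', fun p => ?_⟩
    rw [hmem' p, List.mem_append, List.mem_singleton]
    simp only [List.map_cons, pvTrail, List.mem_cons]
    tauto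

-- the boundary scan over a lex-sorted nonempty list counts its distinct elements
theorem pv_run_count (l : List (Int × Int))
    (h : l.Pairwise (fun a b => toLex a ≤ toLex b)) (hne : l ≠ []) :
    ∀ init : Int,
    (l.zip l.tail).foldl (fun acc pr => if pr.1 ≠ pr.2 then acc + 1 else acc) init =
      init + (l.dedup.length : Int) - 1 := by
  induction l with
  | nil => exact absurd rfl hne
  | cons a l' ih =>
    intro init
    cases l' with
    | nil => simp
    | cons b l'' =>
      have hpair := List.pairwise_cons.mp h
      have hab : toLex a ≤ toLex b := hpair.1 b (List.mem_cons_self ..)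
      have hbl : ∀ x ∈ l'', toLex b ≤ toLex x :=
        (List.pairwise_cons.mp hpair.2).1
      have hmem : a ∈ b :: l'' ↔ a = b := by
        constructor
        · intro hm
          rcases List.mem_cons.mp hm with h' | h'
          · exact h'
          · exact toLex.injective (le_antisymm hab (hbl a h'))
        · intro h'; rw [h']; exact List.mem_cons_self ..
      have ih' := ih hpair.2 (by simp)
      rw [List.tail_cons] at ih'
      by_cases hcase : a = b
      · subst hcase
        rw [List.tail_cons, List.zip_cons_cons, List.foldl_cons, if_neg (by simp)]
        rw [List.dedup_cons_of_mem (List.mem_cons_self ..)]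
        exact ih' init
      · rw [List.tail_cons, List.zip_cons_cons, List.foldl_cons]
        rw [if_pos (by simpa using hcase)]
        rw [List.dedup_cons_of_notMem (fun hm => hcase (hmem.mp hm))]
        rw [ih' (init + 1)]
        simp only [List.length_cons]
        push_cast
        ring
  
-- ===== VERDICT (by name: the statement is the Claim_ definition above) =====
theorem deliver_presents_spec : Claim_equal_deliver_presents := by
  intro instructions _ hpre
  have hv : ∀ c ∈ instructions.toList, c = '^' ∨ c = 'v' ∨ c = '<' ∨ c = '>' := by
    intro c hc
    have := List.all_eq_true.mp hpre c hc
    simp only [Bool.or_eq_true, beq_iff_eq] at this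
    tauto
  unfold Spec_deliver_presents deliver_presents deliver_presents_alt
  -- A's side
  obtain ⟨r, hr, hnd, hmem⟩ := pv_loop_A instructions.toList hv (0, 0)
    ((PySem.Dict.empty : PySem.Dict (Int × Int) Int).setdefault (0, 0) 1) []
    (by decide)
    (by intro p; constructor <;> simp [PySem.Dict.keys, PySem.Dict.setdefault,
      PySem.Dict.empty, PySem.Dict.contains])
  rw [hr]
  -- B's side
  rw [pv_mapM_deltas instructions.toList hv]
  simp only
  have htrail := pv_trail_fold (instructions.toList.map pvDelta) [] ((0, 0) : Int × Int)
  rw [List.nil_append] at htrail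
  rw [htrail]
  simp only [List.nil_append]
  set moves := instructions.toList.map pvDelta with hmv
  set trail := pvTrail ((0, 0) : Int × Int) moves with htr
  set st := PySem.List.sorted trail (fun p => toLex p) false with hst
  have hstne : st ≠ [] := by
    rw [hst, Ne, PySem.List.sorted_eq_nil_iff]
    exact pvTrail_ne_nil _ _
  have hsorted : st.Pairwise (fun a b => toLex a ≤ toLex b) :=
    PySem.List.sorted_pairwise trail (fun p => toLex p)
  rw [PySem.List.slice_from_one]
  rw [pv_run_count st hsorted hstne 1]
  -- both sides count the distinct houses: r.2.keys and st.dedup are nodup with the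
  -- same members, hence permutations of each other
  have hmemeq : ∀ p, p ∈ r.2.keys ↔ p ∈ st.dedup := by
    intro p
    rw [hmem p, List.mem_dedup, hst, PySem.List.mem_sorted]
    simp
  have hperm : r.2.keys.Perm st.dedup :=
    (List.perm_ext_iff_of_nodup hnd st.nodup_dedup).mpr hmemeq
  have hlen : r.2.keys.length = st.dedup.length := hperm.length_eq
  simp only [PySem.Dict.size]
  have hkeys : r.2.keys.length = r.2.items.length := by
    simp [PySem.Dict.keys]
  omega
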